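-- pv_equiv track=rewrite | github.com/gxw1234/arcs_tool | python_demo/src/blu2_api/blu2_protocol.py | digital_channels
-- ===== SOURCE A (Python) =====
-- def digital_channels(bits):
--     """
--     将原始数字数据转换为数字通道。
--
--     返回一个具有 8 行（每个通道一行）的 2d 矩阵。每行包含所选通道的高电平和低电平值。
--     """
--     # 准备具有 8 行（每个通道一行）的 2d 矩阵
--     digital_channels = [[], [], [], [], [], [], [], []]
--     for sample in bits:
--         digital_channels[0].append((sample & 1) >> 0)
--         digital_channels[1].append((sample & 2) >> 1)
--         digital_channels[2].append((sample & 4) >> 2)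
--         digital_channels[3].append((sample & 8) >> 3)
--         digital_channels[4].append((sample & 16) >> 4)
--         digital_channels[5].append((sample & 32) >> 5)
--         digital_channels[6].append((sample & 64) >> 6)
--         digital_channels[7].append((sample & 128) >> 7)
--     return digital_channels
-- ===== SOURCE B (Python) =====
-- def digital_channels(bits):
--     rows = []
--     cur = list(bits)
--     for _ in range(8):
--         rows.append([x % 2 for x in cur])
--         cur = [x // 2 for x in cur]
--     return rows
-- ===== Notes on version B (the rewrite author's own statement) =====
-- stated objective: alternative
-- what changed: B uses staged arithmetic halving: it keeps a list of residual quotients, and in each of 8 rounds emits one row of parities (x % 2) and replaces the whole list by its floor-halves (x // 2), instead of A's single pass that scatters eight masked-and-shifted bits of each sample into eight preallocated rows; no bit masks or shifts at all.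
import Mathlib
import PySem

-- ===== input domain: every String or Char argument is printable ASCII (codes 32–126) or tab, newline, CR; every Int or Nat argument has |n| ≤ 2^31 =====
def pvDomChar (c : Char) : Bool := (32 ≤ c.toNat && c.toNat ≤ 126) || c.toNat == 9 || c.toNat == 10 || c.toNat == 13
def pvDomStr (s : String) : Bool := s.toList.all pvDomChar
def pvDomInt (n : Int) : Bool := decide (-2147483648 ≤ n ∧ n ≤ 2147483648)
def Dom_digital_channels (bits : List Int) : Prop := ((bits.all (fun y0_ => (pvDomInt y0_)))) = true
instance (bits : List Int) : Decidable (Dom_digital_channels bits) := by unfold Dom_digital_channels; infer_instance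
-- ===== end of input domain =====

-- B replaces A's single masked-scatter pass by staged arithmetic halving: eight rounds, each
-- emitting a row of parities (x % 2) and halving the residual-quotient list (x // 2); same cost.

-- ===== PORT A =====
-- one loop iteration of A: append bit k of `sample` (mask-then-shift) to row k, for k = 0..7
def aStep (dc : List (List Int)) (sample : Int) : List (List Int) :=
  [ dc.getD 0 [] ++ [(PySem.Int.band sample 1) >>> (0 : Nat)],
    dc.getD 1 [] ++ [(PySem.Int.band sample 2) >>> (1 : Nat)],
    dc.getD 2 [] ++ [(PySem.Int.band sample 4) >>> (2 : Nat)],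
    dc.getD 3 [] ++ [(PySem.Int.band sample 8) >>> (3 : Nat)],
    dc.getD 4 [] ++ [(PySem.Int.band sample 16) >>> (4 : Nat)],
    dc.getD 5 [] ++ [(PySem.Int.band sample 32) >>> (5 : Nat)],
    dc.getD 6 [] ++ [(PySem.Int.band sample 64) >>> (6 : Nat)],
    dc.getD 7 [] ++ [(PySem.Int.band sample 128) >>> (7 : Nat)] ]

def digital_channels (bits : List Int) : List (List Int) :=
  bits.foldl aStep [[], [], [], [], [], [], [], []]

-- ===== PORT B =====
-- one round of B: append the parity row of the current residuals, then halve all residuals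
def bStep (st : List (List Int) × List Int) (_ : Int) : List (List Int) × List Int :=
  (st.1 ++ [st.2.map (fun x => PySem.Int.mod x 2)],
   st.2.map (fun x => PySem.Int.floordiv x 2))

def digital_channels_alt (bits : List Int) : List (List Int) :=
  ((PySem.List.pyRange 0 8 1).foldl bStep ([], bits)).1

-- ===== PRECONDITION & SPEC =====
def Spec_digital_channels (bits : List Int) (out : List (List Int)) : Prop := out = digital_channels_alt bits
instance (bits : List Int) (out : List (List Int)) : Decidable (Spec_digital_channels bits out) := by unfold Spec_digital_channels; infer_instance

-- ===== CLAIM (what is proved, stated in full; the proofs are below) =====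
def Claim_equal_digital_channels : Prop := ∀ (bits : List Int), Dom_digital_channels bits → Spec_digital_channels bits (digital_channels bits)

-- ===== LEMMAS AND PROOFS =====

theorem castShift (m k : Nat) : ((m : Int) >>> k) = ((m >>> k : Nat) : Int) := rfl

theorem natL1 (n i : Nat) : (n &&& 2^i) >>> i = (n >>> i) &&& 1 := by
  apply Nat.eq_of_testBit_eq
  intro j
  rw [show (1:Nat) = 2^0 from rfl]
  simp only [Nat.testBit_shiftRight, Nat.testBit_and, Nat.testBit_two_pow]
  rcases Nat.eq_zero_or_pos j with h | h
  · subst h; simp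
  · have h2 : ¬ (0 = j) := by omega
    simp [h2]
    intro _
    omega

theorem natTest (n i : Nat) : (n >>> i) % 2 = (n.testBit i).toNat := by
  rcases Nat.mod_two_eq_zero_or_one (n >>> i) with h | h <;>
    simp [Nat.testBit, Nat.one_and_eq_mod_two, h]

theorem natL2 (n i : Nat) : (2^i - (2^i &&& n)) >>> i = 1 - (n >>> i) % 2 := by
  rw [Nat.and_comm, Nat.and_two_pow, natTest]
  have hpos : 0 < 2^i := Nat.two_pow_pos i
  cases h : n.testBit i <;>
    simp [Nat.shiftRight_eq_div_pow, Nat.div_self hpos]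

theorem key (s : Int) (i : Nat) : (PySem.Int.band s ((2:Int)^i)) >>> i = PySem.Int.band (s >>> i) 1 := by
  have hp : ((2:Int)^i).toNat = 2^i := by
    rw [show ((2:Int)^i) = (((2^i : Nat) : Int)) by push_cast; ring, Int.toNat_natCast]
  cases s with
  | ofNat n =>
      simp only [PySem.Int.band, hp]
      norm_num
      rw [castShift n i, castShift (n &&& 2^i) i, natL1]
      have hnn : (0:Int) ≤ ((n >>> i : Nat) : Int) := Int.natCast_nonneg _
      rw [if_pos hnn, max_eq_left hnn, Nat.and_one_is_mod]
      push_cast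
      ring
  | negSucc n =>
      simp only [PySem.Int.band, hp]
      norm_num
      rw [castShift n i, Int.toNat_natCast, castShift (2^i - (2^i &&& n)) i, natL2]

theorem key0 (s : Int) : (PySem.Int.band s 1) >>> (0:Nat) = PySem.Int.band (s >>> (0:Nat)) 1 := by
  simp
theorem key1 (s : Int) : (PySem.Int.band s 2) >>> (1:Nat) = PySem.Int.band (s >>> (1:Nat)) 1 := by
  have h := key s 1; norm_num at h; exact h
theorem key2 (s : Int) : (PySem.Int.band s 4) >>> (2:Nat) = PySem.Int.band (s >>> (2:Nat)) 1 := by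
  have h := key s 2; norm_num at h; exact h
theorem key3 (s : Int) : (PySem.Int.band s 8) >>> (3:Nat) = PySem.Int.band (s >>> (3:Nat)) 1 := by
  have h := key s 3; norm_num at h; exact h
theorem key4 (s : Int) : (PySem.Int.band s 16) >>> (4:Nat) = PySem.Int.band (s >>> (4:Nat)) 1 := by
  have h := key s 4; norm_num at h; exact h
theorem key5 (s : Int) : (PySem.Int.band s 32) >>> (5:Nat) = PySem.Int.band (s >>> (5:Nat)) 1 := by
  have h := key s 5; norm_num at h; exact h
theorem key6 (s : Int) : (PySem.Int.band s 64) >>> (6:Nat) = PySem.Int.band (s >>> (6:Nat)) 1 := by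
  have h := key s 6; norm_num at h; exact h
theorem key7 (s : Int) : (PySem.Int.band s 128) >>> (7:Nat) = PySem.Int.band (s >>> (7:Nat)) 1 := by
  have h := key s 7; norm_num at h; exact h

def chan (i : Nat) (bits : List Int) : List Int :=
  bits.map (fun (sample : Int) => PySem.Int.band (sample >>> i) 1)

theorem foldl_inv (bits : List Int) (c0 c1 c2 c3 c4 c5 c6 c7 : List Int) :
    bits.foldl aStep [c0, c1, c2, c3, c4, c5, c6, c7]
    = [c0 ++ chan 0 bits, c1 ++ chan 1 bits, c2 ++ chan 2 bits, c3 ++ chan 3 bits,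
       c4 ++ chan 4 bits, c5 ++ chan 5 bits, c6 ++ chan 6 bits, c7 ++ chan 7 bits] := by
  induction bits generalizing c0 c1 c2 c3 c4 c5 c6 c7 with
  | nil => simp [chan]
  | cons s rest ih =>
      rw [List.foldl_cons]
      have hstep : aStep [c0, c1, c2, c3, c4, c5, c6, c7] s =
        [ c0 ++ [(PySem.Int.band s 1) >>> (0 : Nat)],
          c1 ++ [(PySem.Int.band s 2) >>> (1 : Nat)],
          c2 ++ [(PySem.Int.band s 4) >>> (2 : Nat)],
          c3 ++ [(PySem.Int.band s 8) >>> (3 : Nat)],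
          c4 ++ [(PySem.Int.band s 16) >>> (4 : Nat)],
          c5 ++ [(PySem.Int.band s 32) >>> (5 : Nat)],
          c6 ++ [(PySem.Int.band s 64) >>> (6 : Nat)],
          c7 ++ [(PySem.Int.band s 128) >>> (7 : Nat)] ] := rfl
      rw [hstep, ih, key0 s, key1 s, key2 s, key3 s, key4 s, key5 s, key6 s, key7 s]
      simp [chan, List.append_assoc]

-- Python's x % 2 is the low bit, and x // 2 is the arithmetic right shift (for every Int x)
theorem mod_two_eq_band (x : Int) : PySem.Int.mod x 2 = PySem.Int.band x 1 := by
  rw [PySem.Int.mod_eq_emod_of_pos (by norm_num)]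
  cases x with
  | ofNat n => simp [PySem.Int.band, Nat.and_one_is_mod]
  | negSucc n => simp [PySem.Int.band]; omega

theorem floordiv_two_eq_shift (x : Int) : PySem.Int.floordiv x 2 = x >>> (1 : Nat) := by
  rw [PySem.Int.floordiv_eq_ediv_of_pos (by norm_num), Int.shiftRight_eq_div_pow]
  norm_num

theorem mapMod (k : Nat) (bits : List Int) :
    (bits.map (fun (x : Int) => x >>> k)).map (fun x => PySem.Int.mod x 2) = chan k bits := by
  simp only [chan, List.map_map]
  exact List.map_congr_left (fun x _ => mod_two_eq_band (x >>> k))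

theorem mapDiv (k : Nat) (bits : List Int) :
    (bits.map (fun (x : Int) => x >>> k)).map (fun x => PySem.Int.floordiv x 2)
    = bits.map (fun (x : Int) => x >>> (k + 1)) := by
  simp only [List.map_map]
  apply List.map_congr_left
  intro x _
  show PySem.Int.floordiv (x >>> k) 2 = x >>> (k + 1)
  rw [floordiv_two_eq_shift, Int.shiftRight_eq_div_pow, Int.shiftRight_eq_div_pow,
    Int.shiftRight_eq_div_pow, Int.ediv_ediv_of_nonneg (by positivity)]
  push_cast
  rw [← pow_succ]

theorem alt_eq (bits : List Int) :
    digital_channels_alt bits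
    = [chan 0 bits, chan 1 bits, chan 2 bits, chan 3 bits,
       chan 4 bits, chan 5 bits, chan 6 bits, chan 7 bits] := by
  unfold digital_channels_alt bStep
  rw [show PySem.List.pyRange 0 8 1 = [0, 1, 2, 3, 4, 5, 6, 7] from by decide]
  conv_lhs => rw [show bits = bits.map (fun (x : Int) => x >>> (0 : Nat)) from by simp]
  simp only [List.foldl_cons, List.foldl_nil, mapMod, mapDiv]
  norm_num

-- ===== VERDICT (by name: the statement is the Claim_ definition above) =====
theorem digital_channels_spec : Claim_equal_digital_channels := by
  intro bits _
  unfold Spec_digital_channels digital_channels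
  rw [foldl_inv, alt_eq]
  simp
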